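-- pv_equiv track=rewrite | github.com/Etamus/Lou_LLM | LouFormatter.py | _replace_word_with_case
-- ===== SOURCE A (Python) =====
-- def _replace_word_with_case(token: str, replacement: str) -> str:
--     if not token:
--         return token
--     start = 0
--     end = len(token)
--     while start < end and not token[start].isalnum():
--         start += 1
--     while end > start and not token[end - 1].isalnum():
--         end -= 1
--     if start >= end:
--         return token
--     return f"{token[:start]}{replacement}{token[end:]}"
-- ===== SOURCE B (Python) =====
-- def _replace_word_with_case(token: str, replacement: str) -> str:
--     idxs = [i for i, ch in enumerate(token) if ch.isalnum()]
--     if not idxs: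
--         return token
--     start, end = idxs[0], idxs[-1] + 1
--     return token[:start] + replacement + token[end:]
-- ===== Notes on version B (the rewrite author's own statement) =====
-- stated objective: simpler
-- what changed: Replaces the empty-guard plus two boundary while-loop scans with a single enumerate pass that collects all alphanumeric indices and slices around the first and last of them.
import Mathlib
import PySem

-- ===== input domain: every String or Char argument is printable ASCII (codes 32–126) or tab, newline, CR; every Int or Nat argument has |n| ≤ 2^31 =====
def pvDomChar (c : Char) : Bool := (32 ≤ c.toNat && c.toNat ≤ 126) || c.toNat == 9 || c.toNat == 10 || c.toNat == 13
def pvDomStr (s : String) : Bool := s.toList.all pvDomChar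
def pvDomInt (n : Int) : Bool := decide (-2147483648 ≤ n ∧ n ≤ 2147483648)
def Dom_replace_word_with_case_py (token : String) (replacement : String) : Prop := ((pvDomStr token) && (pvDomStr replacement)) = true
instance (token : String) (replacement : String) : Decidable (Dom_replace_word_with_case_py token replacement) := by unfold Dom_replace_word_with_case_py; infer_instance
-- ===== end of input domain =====

-- B replaces A's two boundary while-loops (plus empty-string guard) by one enumerate pass
-- collecting all alphanumeric indices and slicing around the first and last one (objective: simpler).

-- ===== PORT A =====
-- while start < end and not token[start].isalnum(): start += 1
-- (the default 'a' of getD is never read: the loop guard keeps start < end ≤ len)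
def pvALoop1 (l : List Char) (start e : Nat) : Nat :=
  if h : start < e ∧ PySem.Chars.isalnum (l.getD start 'a') = false then
    pvALoop1 l (start + 1) e
  else start
termination_by e - start
decreasing_by omega

-- while end > start and not token[end - 1].isalnum(): end -= 1
def pvALoop2 (l : List Char) (start e : Nat) : Nat :=
  if h : e > start ∧ PySem.Chars.isalnum (l.getD (e - 1) 'a') = false then
    pvALoop2 l start (e - 1)
  else e
termination_by e - start
decreasing_by omega

def replace_word_with_case_py (token : String) (replacement : String) : String :=
  let l := token.toList
  if l = [] then token
  else
    let start := pvALoop1 l 0 l.length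
    let e := pvALoop2 l start l.length
    if start ≥ e then token
    -- token[:start] + replacement + token[end:] — slices with 0 ≤ start ≤ end ≤ len are take/drop
    else String.mk (l.take start ++ replacement.toList ++ l.drop e)

-- ===== PORT B =====
def replace_word_with_case_py_alt (token : String) (replacement : String) : String :=
  -- idxs = [i for i, ch in enumerate(token) if ch.isalnum()]
  let idxs : List Int :=
    ((PySem.List.enumerate token.toList 0).filter (fun p => PySem.Chars.isalnum p.2)).map (·.1)
  if idxs = [] then token
  else
    -- start, end = idxs[0], idxs[-1] + 1  (idxs nonempty here, so headD/getLastD defaults are never read)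
    let start := idxs.headD 0
    let e := idxs.getLastD 0 + 1
    -- token[:start] + replacement + token[end:] — in-range nonnegative slices are take/drop
    String.mk (token.toList.take start.toNat ++ replacement.toList ++ token.toList.drop e.toNat)

-- ===== PRECONDITION & SPEC =====
def Spec_replace_word_with_case_py (token : String) (replacement : String) (out : String) : Prop := out = replace_word_with_case_py_alt token replacement
instance (token : String) (replacement : String) (out : String) : Decidable (Spec_replace_word_with_case_py token replacement out) := by unfold Spec_replace_word_with_case_py; infer_instance

-- ===== CLAIM (what is proved, stated in full; the proofs are below) =====
def Claim_equal_replace_word_with_case_py : Prop := ∀ (token : String) (replacement : String), Dom_replace_word_with_case_py token replacement → Spec_replace_word_with_case_py token replacement (replace_word_with_case_py token replacement)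

-- ===== LEMMAS AND PROOFS =====

-- the index list B builds, as a function of the enumerate start offset
def pvIdx (l : List Char) (s : Int) : List Int :=
  ((PySem.List.enumerate l s).filter (fun p => PySem.Chars.isalnum p.2)).map (·.1)

theorem pvIdx_nil (s : Int) : pvIdx [] s = [] := rfl

theorem pvIdx_cons (c : Char) (t : List Char) (s : Int) :
    pvIdx (c :: t) s = if PySem.Chars.isalnum c then s :: pvIdx t (s + 1) else pvIdx t (s + 1) := by
  by_cases h : PySem.Chars.isalnum c <;>
    simp [pvIdx, PySem.List.enumerate_cons, List.filter_cons, h]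

theorem pvIdx_concat (t : List Char) (c : Char) (s : Int) :
    pvIdx (t ++ [c]) s =
      pvIdx t s ++ (if PySem.Chars.isalnum c then [s + t.length] else []) := by
  by_cases h : PySem.Chars.isalnum c <;>
    simp [pvIdx, PySem.List.enumerate_append, List.filter_append, PySem.List.enumerate_cons,
      List.filter_cons, h]

theorem pvIdx_eq_nil_iff (l : List Char) (s : Int) :
    pvIdx l s = [] ↔ ∀ c ∈ l, PySem.Chars.isalnum c = false := by
  induction l generalizing s with
  | nil => simp [pvIdx_nil]
  | cons c t ih =>
    rw [pvIdx_cons]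
    by_cases h : PySem.Chars.isalnum c <;> simp [h, ih (s + 1)]

theorem pvIdx_head (l : List Char) (s : Int)
    (hex : ∃ c ∈ l, PySem.Chars.isalnum c = true) :
    (pvIdx l s).head? = some (s + ((l.takeWhile (fun c => !PySem.Chars.isalnum c)).length : Int)) := by
  induction l generalizing s with
  | nil => simp at hex
  | cons c t ih =>
    rw [pvIdx_cons]
    by_cases h : PySem.Chars.isalnum c
    · rw [if_pos h, List.takeWhile_cons_of_neg (by simp [h])]
      simp
    · have hf : PySem.Chars.isalnum c = false := by simpa using h
      have hex' : ∃ x ∈ t, PySem.Chars.isalnum x = true := by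
        rcases hex with ⟨x, hx, hxa⟩
        rcases List.mem_cons.mp hx with hx | hx
        · rw [hx] at hxa; exact absurd hxa (by simp [hf])
        · exact ⟨x, hx, hxa⟩
      rw [if_neg h, ih (s + 1) hex', List.takeWhile_cons_of_pos (by simp [hf])]
      congr 1
      simp only [List.length_cons]
      push_cast
      ring

theorem pvIdx_last (l : List Char) (s : Int)
    (hex : ∃ c ∈ l, PySem.Chars.isalnum c = true) :
    (pvIdx l s).getLast? =
      some (s + (l.length : Int) - 1 - ((l.reverse.takeWhile (fun c => !PySem.Chars.isalnum c)).length : Int)) := by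
  induction l using List.reverseRecOn with
  | nil => simp at hex
  | append_singleton t c ih =>
    rw [pvIdx_concat]
    by_cases h : PySem.Chars.isalnum c
    · rw [if_pos h, List.getLast?_concat]
      rw [List.reverse_append, List.reverse_singleton, List.singleton_append,
        List.takeWhile_cons_of_neg (by simp [h])]
      congr 1
      simp only [List.length_append, List.length_nil, List.length_cons]
      push_cast
      ring
    · have hf : PySem.Chars.isalnum c = false := by simpa using h
      have hex' : ∃ x ∈ t, PySem.Chars.isalnum x = true := by
        rcases hex with ⟨x, hx, hxa⟩
        rcases List.mem_append.mp hx with hx | hx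
        · exact ⟨x, hx, hxa⟩
        · simp at hx; rw [hx] at hxa; exact absurd hxa (by simp [hf])
      rw [if_neg h, List.append_nil, ih hex']
      rw [List.reverse_append, List.reverse_singleton, List.singleton_append,
        List.takeWhile_cons_of_pos (by simp [hf])]
      congr 1
      simp only [List.length_append, List.length_nil, List.length_cons]
      push_cast
      ring

-- A's first loop computes the length of the non-alphanumeric prefix
theorem pvALoop1_eq (l : List Char) (s : Nat) :
    pvALoop1 l s l.length = s + ((l.drop s).takeWhile (fun c => !PySem.Chars.isalnum c)).length := by
  rw [pvALoop1]
  split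
  · next h =>
    obtain ⟨h1, h2⟩ := h
    have hd : l.drop s = l[s] :: l.drop (s + 1) := List.drop_eq_getElem_cons h1
    have hg : l.getD s 'a' = l[s] := List.getD_eq_getElem l 'a' h1
    rw [hg] at h2
    rw [pvALoop1_eq l (s + 1), hd, List.takeWhile_cons_of_pos (by simp [h2])]
    simp only [List.length_cons]
    omega
  · next h =>
    by_cases hs : s < l.length
    · have hg : l.getD s 'a' = l[s] := List.getD_eq_getElem l 'a' hs
      have h2 : PySem.Chars.isalnum l[s] = true := by
        cases hb : PySem.Chars.isalnum l[s] with
        | false => exact absurd ⟨hs, by rw [hg]; exact hb⟩ h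
        | true => rfl
      have hd : l.drop s = l[s] :: l.drop (s + 1) := List.drop_eq_getElem_cons hs
      rw [hd, List.takeWhile_cons_of_neg (by simp [h2])]
      simp
    · rw [List.drop_eq_nil_of_le (by omega)]
      simp
termination_by l.length - s
decreasing_by omega

-- A's second loop strips the non-alphanumeric suffix (given an alphanumeric char in [s, e))
theorem pvALoop2_eq (l : List Char) (s e : Nat) (he : e ≤ l.length)
    (hex : ∃ j, s ≤ j ∧ j < e ∧ PySem.Chars.isalnum (l.getD j ' ') = true) :
    pvALoop2 l s e = e - (((l.take e).reverse).takeWhile (fun c => !PySem.Chars.isalnum c)).length := by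
  obtain ⟨j, hj1, hj2, hj3⟩ := hex
  have he1 : 1 ≤ e := by omega
  have hlt : e - 1 < l.length := by omega
  have hg : l.getD (e - 1) 'a' = l[e - 1] := List.getD_eq_getElem l 'a' hlt
  have hee : e = (e - 1) + 1 := by omega
  have htake : l.take e = l.take (e - 1) ++ [l[e - 1]] := by
    conv_lhs => rw [hee]
    rw [List.take_succ, List.getElem?_eq_getElem hlt]
    rfl
  rw [pvALoop2]
  split
  · next h =>
    obtain ⟨h1, h2⟩ := h
    rw [hg] at h2
    have hjne : j ≠ e - 1 := by
      intro hh
      rw [hh, List.getD_eq_getElem l ' ' hlt] at hj3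
      rw [hj3] at h2
      exact absurd h2 (by simp)
    have hex' : ∃ j, s ≤ j ∧ j < e - 1 ∧ PySem.Chars.isalnum (l.getD j ' ') = true :=
      ⟨j, hj1, by omega, hj3⟩
    rw [pvALoop2_eq l s (e - 1) (by omega) hex']
    rw [htake, List.reverse_append, List.reverse_singleton, List.singleton_append,
      List.takeWhile_cons_of_pos (by simp [h2])]
    have hklen : ((l.take (e - 1)).reverse.takeWhile (fun c => !PySem.Chars.isalnum c)).length
        ≤ e - 1 := by
      calc ((l.take (e - 1)).reverse.takeWhile (fun c => !PySem.Chars.isalnum c)).length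
          ≤ (l.take (e - 1)).reverse.length := (List.takeWhile_prefix _).length_le
        _ ≤ e - 1 := by simp
    simp only [List.length_cons]
    omega
  · next h =>
    have h2 : PySem.Chars.isalnum l[e - 1] = true := by
      cases hb : PySem.Chars.isalnum l[e - 1] with
      | false => exact absurd ⟨by omega, by rw [hg]; exact hb⟩ h
      | true => rfl
    rw [htake, List.reverse_append, List.reverse_singleton, List.singleton_append,
      List.takeWhile_cons_of_neg (by simp [h2])]
    simp
termination_by e - s
decreasing_by omega

-- ===== VERDICT (by name: the statement is the Claim_ definition above) =====
theorem replace_word_with_case_py_spec : Claim_equal_replace_word_with_case_py := by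
  intro token replacement _
  unfold Spec_replace_word_with_case_py
  unfold replace_word_with_case_py replace_word_with_case_py_alt
  set l := token.toList with hl
  have hidx : ((PySem.List.enumerate l 0).filter (fun p => PySem.Chars.isalnum p.2)).map (·.1)
      = pvIdx l 0 := rfl
  simp only [hidx]
  by_cases hnil : l = []
  · simp [hnil, pvIdx_nil]
  · by_cases hex : ∃ c ∈ l, PySem.Chars.isalnum c = true
    · -- some alphanumeric character exists: both replace the core
      set q : Char → Bool := fun c => !PySem.Chars.isalnum c with hq
      set st : Nat := (l.takeWhile q).length with hst
      set rt : Nat := (l.reverse.takeWhile q).length with hrt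
      have hstle : st ≤ l.length := by
        have := (List.takeWhile_prefix q (l := l)).length_le
        omega
      have hrtle : rt ≤ l.length := by
        have := (List.takeWhile_prefix q (l := l.reverse)).length_le
        simp at this
        omega
      have hq_pre : ∀ k, k < st → q (l.getD k ' ') = true := by
        intro k hk
        have hkl : k < l.length := by omega
        have h1 : (l.takeWhile q)[k]'hk ∈ l.takeWhile q := List.getElem_mem hk
        have h2 := List.mem_takeWhile_imp h1
        have h3 := (List.takeWhile_prefix q (l := l)).getElem (i := k) hk
        rw [List.getD_eq_getElem l ' ' hkl]
        exact h3 ▸ h2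
      have hq_suf : ∀ k, k < rt → q (l.reverse.getD k ' ') = true := by
        intro k hk
        have hkl : k < l.reverse.length := by simp; omega
        have h1 : (l.reverse.takeWhile q)[k]'hk ∈ l.reverse.takeWhile q := List.getElem_mem hk
        have h2 := List.mem_takeWhile_imp h1
        have h3 := (List.takeWhile_prefix q (l := l.reverse)).getElem (i := k) hk
        rw [List.getD_eq_getElem l.reverse ' ' hkl]
        exact h3 ▸ h2
      obtain ⟨x, hx, hxa⟩ := hex
      obtain ⟨j, hjlt, hjx⟩ := List.mem_iff_getElem.mp hx
      have hjst : st ≤ j := by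
        by_contra hc
        have := hq_pre j (by omega)
        rw [List.getD_eq_getElem l ' ' hjlt, hjx, hq] at this
        simp [hxa] at this
      have hjrt : j + rt < l.length := by
        by_contra hc
        have hk : l.length - 1 - j < rt := by omega
        have := hq_suf (l.length - 1 - j) hk
        have hkl : l.length - 1 - j < l.reverse.length := by simp; omega
        rw [List.getD_eq_getElem l.reverse ' ' hkl, List.getElem_reverse] at this
        have hjj : l.length - 1 - (l.length - 1 - j) = j := by omega
        simp only [hjj] at this
        rw [hjx, hq] at this
        simp [hxa] at this
      have hstlt : st < l.length - rt := by omega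
      have hA1 : pvALoop1 l 0 l.length = st := by
        rw [pvALoop1_eq]
        simp [hq, hst]
      have hA2 : pvALoop2 l st l.length = l.length - rt := by
        rw [pvALoop2_eq l st l.length le_rfl ⟨j, hjst, hjlt, by
          rw [List.getD_eq_getElem l ' ' hjlt, hjx]; exact hxa⟩]
        rw [List.take_length]
      have hBne : pvIdx l 0 ≠ [] := by
        rw [Ne, pvIdx_eq_nil_iff]
        intro hall
        have := hall x hx
        rw [this] at hxa
        exact absurd hxa (by simp)
      have hBh : (pvIdx l 0).head? = some ((st : Int)) := by
        rw [pvIdx_head l 0 ⟨x, hx, hxa⟩]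
        simp [hq, hst]
      have hBl : (pvIdx l 0).getLast? = some ((l.length : Int) - 1 - (rt : Int)) := by
        rw [pvIdx_last l 0 ⟨x, hx, hxa⟩]
        congr 1
        simp [hq, hrt]
      have hhd : (pvIdx l 0).headD 0 = (st : Int) := by
        rw [List.headD_eq_head?_getD, hBh]
        rfl
      have hld : (pvIdx l 0).getLastD 0 = (l.length : Int) - 1 - (rt : Int) := by
        rw [List.getLastD_eq_getLast?, hBl]
        rfl
      rw [if_neg hnil, hA1, hA2, if_neg (by omega : ¬ st ≥ l.length - rt),
        if_neg hBne, hhd, hld]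
      have h1 : ((st : Int)).toNat = st := by omega
      have h2 : ((l.length : Int) - 1 - (rt : Int) + 1).toNat = l.length - rt := by omega
      rw [h1, h2]
    · -- no alphanumeric character: both return the token unchanged
      push_neg at hex
      have hall : ∀ c ∈ l, PySem.Chars.isalnum c = false := by
        intro c hc
        simpa using hex c hc
      have htw : l.takeWhile (fun c => !PySem.Chars.isalnum c) = l :=
        List.takeWhile_eq_self_iff.mpr (by intro a ha; simp [hall a ha])
      have hA1 : pvALoop1 l 0 l.length = l.length := by
        rw [pvALoop1_eq]
        simp [htw]
      have hA2 : pvALoop2 l l.length l.length = l.length := by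
        rw [pvALoop2]
        simp
      have hB : pvIdx l 0 = [] := (pvIdx_eq_nil_iff l 0).mpr hall
      rw [if_neg hnil, hA1, hA2, if_pos (le_refl l.length), if_pos hB]
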